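-- pv_equiv track=rewrite | github.com/mirzaAsca/consultancy-asca | scripts/paper-creator/analysis/optimize.py | base_feature_name
-- ===== SOURCE A (Python) =====
-- from typing import Any, Dict, Iterable, List, Tuple
--
-- def base_feature_name(transformed_name: str, categorical_features: Iterable[str]) -> str:
--     if "__" in transformed_name:
--         rest = transformed_name.split("__", 1)[1]
--     else:
--         rest = transformed_name
--     if transformed_name.startswith("num__"):
--         return rest
--     for col in sorted(categorical_features, key=len, reverse=True):
--         prefix = f"{col}_"
--         if rest == col or rest.startswith(prefix):
--             return col
--     return rest
-- ===== SOURCE B (Python) =====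
-- def base_feature_name(transformed_name: str, categorical_features) -> str:
--     if "__" in transformed_name:
--         rest = transformed_name.split("__", 1)[1]
--     else:
--         rest = transformed_name
--     if transformed_name.startswith("num__"):
--         return rest
--     best = None
--     for col in categorical_features:
--         if (rest == col or rest.startswith(col + "_")) and (best is None or len(col) > len(best)):
--             best = col
--     return rest if best is None else best
-- ===== Notes on version B (the rewrite author's own statement) =====
-- stated objective: simpler
-- what changed: Replaced the sort-by-length-descending-then-return-first-match loop with a single unsorted pass that keeps the longest matching categorical feature (ties are impossible since equal-length matches must be the same string).
import Mathlib
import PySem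

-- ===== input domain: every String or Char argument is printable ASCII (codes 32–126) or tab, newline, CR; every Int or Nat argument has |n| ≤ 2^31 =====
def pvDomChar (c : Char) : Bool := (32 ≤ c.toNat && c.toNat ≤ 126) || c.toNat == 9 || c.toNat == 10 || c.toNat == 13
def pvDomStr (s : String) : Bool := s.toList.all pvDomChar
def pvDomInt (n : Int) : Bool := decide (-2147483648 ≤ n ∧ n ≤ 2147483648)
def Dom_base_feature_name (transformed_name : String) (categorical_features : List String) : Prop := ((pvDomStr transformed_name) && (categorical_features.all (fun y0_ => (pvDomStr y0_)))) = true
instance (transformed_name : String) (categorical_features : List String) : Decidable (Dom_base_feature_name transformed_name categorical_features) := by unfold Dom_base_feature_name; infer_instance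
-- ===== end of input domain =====

-- B replaces A's sort-by-length-descending-then-first-match loop by a single pass keeping the
-- longest matching categorical feature (objective: simpler — no sort, one linear scan).

-- ===== PORT A =====
-- shared by both ports: the first two Python lines (rest = transformed_name.split("__",1)[1]
-- if "__" in transformed_name else transformed_name), identical in A and in B.
-- the '| _ => t' arm is unreachable: with "__" in t, split("__", 1) has exactly two parts.
def pvRest (t : String) : String :=
  if PySem.Str.isIn "__" t then
    match PySem.Str.splitMax? t "__" 1 with
    | some (_ :: r :: _) => r
    | _ => t
  else t

-- A's for-loop over the sorted list: return the first matching col, else rest.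
def pvMatchA (rest : String) : List String → String
  | [] => rest
  | col :: tl =>
    let pre := col ++ "_"
    if rest == col || PySem.Str.startswith rest pre then col else pvMatchA rest tl

def base_feature_name (transformed_name : String) (categorical_features : List String) : String :=
  let rest := pvRest transformed_name
  if PySem.Str.startswith transformed_name "num__" then rest
  else pvMatchA rest (PySem.List.sorted categorical_features PySem.Str.len true)

-- ===== PORT B =====
-- B's loop body: keep the strictly longer matching col.
def pvStep (rest : String) (best : Option String) (col : String) : Option String :=
  if (rest == col || PySem.Str.startswith rest (col ++ "_")) &&
     (match best with | none => true | some b => PySem.Str.len col > PySem.Str.len b)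
  then some col else best

def base_feature_name_alt (transformed_name : String) (categorical_features : List String) : String :=
  let rest := pvRest transformed_name
  if PySem.Str.startswith transformed_name "num__" then rest
  else
    match categorical_features.foldl (pvStep rest) none with
    | none => rest
    | some b => b

-- ===== PRECONDITION & SPEC =====
def Spec_base_feature_name (transformed_name : String) (categorical_features : List String) (out : String) : Prop := out = base_feature_name_alt transformed_name categorical_features
instance (transformed_name : String) (categorical_features : List String) (out : String) : Decidable (Spec_base_feature_name transformed_name categorical_features out) := by unfold Spec_base_feature_name; infer_instance

-- ===== CLAIM (what is proved, stated in full; the proofs are below) =====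
def Claim_equal_base_feature_name : Prop := ∀ (transformed_name : String) (categorical_features : List String), Dom_base_feature_name transformed_name categorical_features → Spec_base_feature_name transformed_name categorical_features (base_feature_name transformed_name categorical_features)

-- ===== LEMMAS AND PROOFS =====

-- the match test both loops use
def pvM (rest col : String) : Bool := rest == col || PySem.Str.startswith rest (col ++ "_")

theorem pvStrLen_eq (s : String) : PySem.Str.len s = (s.length : Int) := by
  simp [PySem.Str.len]

-- two matches of equal length are the same string
theorem pv_uniq {rest c1 c2 : String} (h1 : pvM rest c1 = true) (h2 : pvM rest c2 = true)
    (hl : c1.length = c2.length) : c1 = c2 := by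
  unfold pvM at h1 h2
  simp only [Bool.or_eq_true, beq_iff_eq, PySem.Str.startswith_eq, PySem.Chars.startswith_iff] at h1 h2
  have lenpre : ∀ c : String, (c ++ "_").toList.length = c.length + 1 := by
    intro c; simp
  rcases h1 with h1 | h1 <;> rcases h2 with h2 | h2
  · rw [← h1, ← h2]
  · exfalso
    have := h2.length_le
    rw [lenpre] at this
    have : rest.toList.length = rest.length := by simp
    have hr1 : c1.length = rest.length := by rw [h1]
    have := h2.length_le
    rw [lenpre] at this
    simp only [String.length] at *
    omega
  · exfalso
    have := h1.length_le
    rw [lenpre] at this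
    have hr2 : c2.length = rest.length := by rw [h2]
    simp only [String.length] at *
    omega
  · have hle : (c1 ++ "_").toList.length ≤ (c2 ++ "_").toList.length := by
      rw [lenpre, lenpre]; omega
    have hpp := List.prefix_of_prefix_length_le h1 h2 hle
    have heq : (c1 ++ "_").toList = (c2 ++ "_").toList :=
      List.IsPrefix.eq_of_length_le hpp (by rw [lenpre, lenpre]; omega)
    have : c1.toList ++ ['_'] = c2.toList ++ ['_'] := by
      simpa using heq
    have : c1.toList = c2.toList := by
      exact List.append_cancel_right this
    exact String.toList_inj.mp this

theorem pvMatchA_eq_if (rest col : String) (tl : List String) :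
    pvMatchA rest (col :: tl) = if pvM rest col then col else pvMatchA rest tl := by
  simp [pvMatchA, pvM]

theorem pvStep_eq_if (rest : String) (best : Option String) (col : String) :
    pvStep rest best col =
      if pvM rest col && (match best with | none => true | some b => PySem.Str.len col > PySem.Str.len b)
      then some col else best := by
  simp [pvStep, pvM]

theorem pvA_none (rest : String) : ∀ (l : List String), (∀ c ∈ l, pvM rest c = false) →
    pvMatchA rest l = rest := by
  intro l
  induction l with
  | nil => intro _; rfl
  | cons c tl ih =>
    intro h
    rw [pvMatchA_eq_if, h c (by simp), if_neg Bool.false_ne_true]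
    exact ih (fun x hx => h x (by simp [hx]))

theorem pvA_best (rest : String) : ∀ (l : List String),
    List.Pairwise (fun a b => PySem.Str.len b ≤ PySem.Str.len a) l →
    ∀ c0 ∈ l, pvM rest c0 = true →
    pvM rest (pvMatchA rest l) = true ∧ pvMatchA rest l ∈ l ∧
      ∀ c ∈ l, pvM rest c = true → c.length ≤ (pvMatchA rest l).length := by
  intro l
  induction l with
  | nil => intro _ c0 hc0; cases hc0
  | cons h tl ih =>
    intro hpc c0 hc0 hm
    rw [List.pairwise_cons] at hpc
    obtain ⟨hh, hp⟩ := hpc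
    by_cases hmh : pvM rest h = true
    · rw [pvMatchA_eq_if, if_pos hmh]
      refine ⟨hmh, by simp, ?_⟩
      intro c hc _
      rcases List.mem_cons.mp hc with rfl | hc
      · exact le_refl _
      · have := hh c hc
        rw [pvStrLen_eq, pvStrLen_eq] at this
        omega
    · rw [pvMatchA_eq_if, if_neg hmh]
      have hc0tl : c0 ∈ tl := by
        rcases List.mem_cons.mp hc0 with rfl | h'
        · exact absurd hm hmh
        · exact h'
      obtain ⟨m1, m2, m3⟩ := ih hp c0 hc0tl hm
      refine ⟨m1, by simp [m2], ?_⟩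
      intro c hc hcm
      rcases List.mem_cons.mp hc with rfl | hc
      · exact absurd hcm hmh
      · exact m3 c hc hcm

theorem pvBmax (rest : String) (l : List String) (a : String) (ha : pvM rest a = true) :
    ∃ b, l.foldl (pvStep rest) (some a) = some b ∧ pvM rest b = true ∧ (b = a ∨ b ∈ l) ∧
      a.length ≤ b.length ∧ ∀ c ∈ l, pvM rest c = true → c.length ≤ b.length := by
  induction l generalizing a with
  | nil => exact ⟨a, rfl, ha, Or.inl rfl, le_refl _, by simp⟩
  | cons c tl ih =>
    simp only [List.foldl_cons]
    rw [pvStep_eq_if]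
    by_cases hcond : (pvM rest c && (PySem.Str.len a < PySem.Str.len c)) = true
    · simp only [Bool.and_eq_true, decide_eq_true_eq] at hcond
      obtain ⟨hmc, hlt⟩ := hcond
      have hlt' : a.length < c.length := by
        rw [pvStrLen_eq, pvStrLen_eq] at hlt; omega
      rw [if_pos (by simp [hmc, hlt'])]
      obtain ⟨b, hb1, hb2, hbm, hb3, hb4⟩ := ih c hmc
      have hbm' : b ∈ c :: tl := by
        rcases hbm with rfl | h'
        · simp
        · simp [h']
      refine ⟨b, hb1, hb2, Or.inr hbm', by omega, ?_⟩

      intro c' hc' hmc'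
      rcases List.mem_cons.mp hc' with rfl | hc'
      · exact hb3
      · exact hb4 c' hc' hmc'
    · rw [if_neg (by simpa using hcond)]
      obtain ⟨b, hb1, hb2, hbm, hb3, hb4⟩ := ih a ha
      have hbm' : b = a ∨ b ∈ c :: tl := by
        rcases hbm with rfl | h'
        · exact Or.inl rfl
        · exact Or.inr (by simp [h'])
      refine ⟨b, hb1, hb2, hbm', hb3, ?_⟩
      intro c' hc' hmc'
      rcases List.mem_cons.mp hc' with rfl | hc'
      · simp only [Bool.and_eq_true, decide_eq_true_eq, not_and] at hcond
        have := hcond hmc'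
        rw [pvStrLen_eq, pvStrLen_eq] at this
        omega
      · exact hb4 c' hc' hmc'

theorem pvB_none (rest : String) (l : List String) (h : ∀ c ∈ l, pvM rest c = false) :
    l.foldl (pvStep rest) none = none := by
  induction l with
  | nil => rfl
  | cons c tl ih =>
    simp only [List.foldl_cons]
    rw [pvStep_eq_if, if_neg (by simp [h c (by simp)])]
    exact ih (fun x hx => h x (by simp [hx]))

theorem pvB_some (rest : String) : ∀ (l : List String),
    ∀ c0 ∈ l, pvM rest c0 = true →
    ∃ b, l.foldl (pvStep rest) none = some b ∧ pvM rest b = true ∧ b ∈ l ∧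
      ∀ c ∈ l, pvM rest c = true → c.length ≤ b.length := by
  intro l
  induction l with
  | nil => intro c0 hc0; cases hc0
  | cons h tl ih =>
    intro c0 hc0 hm
    simp only [List.foldl_cons]
    by_cases hmh : pvM rest h = true
    · rw [pvStep_eq_if, if_pos (by simp [hmh])]
      obtain ⟨b, hb1, hb2, hbm, hb3, hb4⟩ := pvBmax rest tl h hmh
      have hbm' : b ∈ h :: tl := by
        rcases hbm with rfl | h'
        · simp
        · simp [h']
      refine ⟨b, hb1, hb2, hbm', ?_⟩
      intro c hc hcm
      rcases List.mem_cons.mp hc with rfl | hc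
      · exact hb3
      · exact hb4 c hc hcm
    · rw [pvStep_eq_if, if_neg (by simp [hmh])]
      have hc0tl : c0 ∈ tl := by
        rcases List.mem_cons.mp hc0 with rfl | h'
        · exact absurd hm hmh
        · exact h'
      obtain ⟨b, hb1, hb2, hbm, hb3⟩ := ih c0 hc0tl hm
      refine ⟨b, hb1, hb2, by simp [hbm], ?_⟩
      intro c hc hcm
      rcases List.mem_cons.mp hc with rfl | hc
      · exact absurd hcm hmh
      · exact hb3 c hc hcm

theorem pv_main (rest : String) (cats : List String) :
    pvMatchA rest (PySem.List.sorted cats PySem.Str.len true) =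
      (match cats.foldl (pvStep rest) none with | none => rest | some b => b) := by
  by_cases hex : ∃ c ∈ cats, pvM rest c = true
  · obtain ⟨c0, hc0, hm⟩ := hex
    have hc0s : c0 ∈ PySem.List.sorted cats PySem.Str.len true :=
      (PySem.List.mem_sorted cats PySem.Str.len true c0).mpr hc0
    obtain ⟨a1, a2, a3⟩ := pvA_best rest _ (PySem.List.sorted_pairwise_rev cats PySem.Str.len) c0 hc0s hm
    obtain ⟨b, hb1, hb2, hbm, hb3⟩ := pvB_some rest cats c0 hc0 hm
    rw [hb1]
    show pvMatchA rest (PySem.List.sorted cats PySem.Str.len true) = b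
    have hAmem : pvMatchA rest (PySem.List.sorted cats PySem.Str.len true) ∈ cats :=
      (PySem.List.mem_sorted cats PySem.Str.len true _).mp a2
    have hbs : b ∈ PySem.List.sorted cats PySem.Str.len true :=
      (PySem.List.mem_sorted cats PySem.Str.len true b).mpr hbm
    have h1 : (pvMatchA rest (PySem.List.sorted cats PySem.Str.len true)).length ≤ b.length :=
      hb3 _ hAmem a1
    have h2 : b.length ≤ (pvMatchA rest (PySem.List.sorted cats PySem.Str.len true)).length :=
      a3 b hbs hb2
    exact pv_uniq a1 hb2 (by omega)
  · push Not at hex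
    have hall : ∀ c ∈ cats, pvM rest c = false := by
      intro c hc
      simpa using hex c hc
    rw [pvB_none rest cats hall]
    exact pvA_none rest _ (fun c hc => hall c ((PySem.List.mem_sorted cats PySem.Str.len true c).mp hc))

-- ===== VERDICT (by name: the statement is the Claim_ definition above) =====
theorem base_feature_name_spec : Claim_equal_base_feature_name := by
  intro t cats _
  show base_feature_name t cats = base_feature_name_alt t cats
  show (if PySem.Str.startswith t "num__" then pvRest t
        else pvMatchA (pvRest t) (PySem.List.sorted cats PySem.Str.len true)) =
       (if PySem.Str.startswith t "num__" then pvRest t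
        else match cats.foldl (pvStep (pvRest t)) none with | none => pvRest t | some b => b)
  cases hnum : PySem.Str.startswith t "num__" with
  | true => rfl
  | false =>
    rw [if_neg Bool.false_ne_true, if_neg Bool.false_ne_true]
    exact pv_main (pvRest t) cats
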